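-- pv_equiv track=rewrite | github.com/AdityaPatadiya/PostQ-ParkChain | backend/EchelonCrypt/Decryption/matrix_decryption.py | choose_candidate
-- ===== SOURCE A (Python) =====
-- def choose_candidate(candidates):
--     # If no candidates, return None
--     if not candidates:
--         return None
--
--     # Filter to printable ASCII
--     printable = [c for c in candidates if 32 <= c <= 126]
--
--     if len(printable) == 1:
--         return printable[0]
--
--     if len(printable) > 1:
--         # Prioritize letters first (a-z, A-Z)
--         letters = [c for c in printable if (65 <= c <= 90) or (97 <= c <= 122)]
--         if letters:
--             return letters[0]  # pick first letter
--         return printable[0]  # otherwise pick first printable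
--
--     # If no printable, just return the first candidate
--     return candidates[0]
-- ===== SOURCE B (Python) =====
-- def choose_candidate(candidates):
--     if not candidates:
--         return None
--     first_printable = None
--     first_letter = None
--     for c in candidates:
--         if first_printable is None and 32 <= c <= 126:
--             first_printable = c
--         if first_letter is None and (65 <= c <= 90 or 97 <= c <= 122):
--             first_letter = c
--     if first_printable is None:
--         return candidates[0]
--     return first_letter if first_letter is not None else first_printable
-- ===== Notes on version B (the rewrite author's own statement) =====
-- stated objective: simpler
-- what changed: Replaces the three list comprehensions and the len==1/len>1 branching with a single pass that tracks the first printable byte and the first letter byte, then picks letter > printable > first candidate.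
import Mathlib
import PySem

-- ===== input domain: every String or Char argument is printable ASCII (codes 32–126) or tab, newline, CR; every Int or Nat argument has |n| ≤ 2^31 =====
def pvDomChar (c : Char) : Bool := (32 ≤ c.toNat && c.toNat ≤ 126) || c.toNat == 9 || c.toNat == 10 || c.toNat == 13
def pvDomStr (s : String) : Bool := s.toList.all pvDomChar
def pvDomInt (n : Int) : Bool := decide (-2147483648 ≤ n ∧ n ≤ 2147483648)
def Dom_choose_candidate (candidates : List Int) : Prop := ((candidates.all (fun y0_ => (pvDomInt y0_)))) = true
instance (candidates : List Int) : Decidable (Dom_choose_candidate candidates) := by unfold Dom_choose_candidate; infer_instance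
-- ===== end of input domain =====

-- B replaces A's three comprehensions and length branching with one pass tracking the first printable and first letter byte (simpler, same O(n)).


-- ===== PORT A =====
def choose_candidate (candidates : List Int) : Option Int :=
  if candidates = [] then none
  else
    let printable := candidates.filter (fun c => decide (32 ≤ c ∧ c ≤ 126))
    if printable.length = 1 then PySem.List.pyGet? printable 0
    else if printable.length > 1 then
      let letters := printable.filter (fun c => decide ((65 ≤ c ∧ c ≤ 90) ∨ (97 ≤ c ∧ c ≤ 122)))
      if letters ≠ [] then PySem.List.pyGet? letters 0
      else PySem.List.pyGet? printable 0
    else PySem.List.pyGet? candidates 0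

-- ===== PORT B =====
-- one fold step of B's single pass: update (first_printable, first_letter)
def ccStep (s : Option Int × Option Int) (c : Int) : Option Int × Option Int :=
  ((if s.1 = none ∧ 32 ≤ c ∧ c ≤ 126 then some c else s.1),
   (if s.2 = none ∧ ((65 ≤ c ∧ c ≤ 90) ∨ (97 ≤ c ∧ c ≤ 122)) then some c else s.2))

def choose_candidate_alt (candidates : List Int) : Option Int :=
  if candidates = [] then none
  else
    let s := candidates.foldl ccStep (none, none)
    match s.1 with
    | none => PySem.List.pyGet? candidates 0
    | some p =>
      match s.2 with
      | some l => some l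
      | none => some p

-- ===== PRECONDITION & SPEC =====
def Spec_choose_candidate (candidates : List Int) (out : Option Int) : Prop := out = choose_candidate_alt candidates
instance (candidates : List Int) (out : Option Int) : Decidable (Spec_choose_candidate candidates out) := by unfold Spec_choose_candidate; infer_instance

-- ===== CLAIM (what is proved, stated in full; the proofs are below) =====
def Claim_equal_choose_candidate : Prop := ∀ (candidates : List Int), Dom_choose_candidate candidates → Spec_choose_candidate candidates (choose_candidate candidates)

-- ===== LEMMAS AND PROOFS =====

-- the fold computes the head of each filtered list
theorem ccFold_eq (l : List Int) (fp fl : Option Int) :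
    l.foldl ccStep (fp, fl) =
      (fp.or ((l.filter (fun c => decide (32 ≤ c ∧ c ≤ 126))).head?),
       fl.or ((l.filter (fun c => decide ((65 ≤ c ∧ c ≤ 90) ∨ (97 ≤ c ∧ c ≤ 122)))).head?)) := by
  induction l generalizing fp fl with
  | nil => simp
  | cons c t ih =>
    simp only [List.foldl_cons, ccStep, List.filter_cons]
    rw [ih]
    cases fp <;> cases fl <;>
      by_cases h1 : (32:Int) ≤ c ∧ c ≤ 126 <;>
      by_cases h2 : ((65:Int) ≤ c ∧ c ≤ 90) ∨ ((97:Int) ≤ c ∧ c ≤ 122) <;>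
      simp [h1, h2, Option.or]

-- letters are printable, so filtering letters out of printables = filtering letters directly
theorem filter_letter_printable (l : List Int) :
    (l.filter (fun c => decide (32 ≤ c ∧ c ≤ 126))).filter
        (fun c => decide ((65 ≤ c ∧ c ≤ 90) ∨ (97 ≤ c ∧ c ≤ 122)))
    = l.filter (fun c => decide ((65 ≤ c ∧ c ≤ 90) ∨ (97 ≤ c ∧ c ≤ 122))) := by
  rw [List.filter_filter]
  apply List.filter_congr
  intro a _
  by_cases h2 : ((65:Int) ≤ a ∧ a ≤ 90) ∨ ((97:Int) ≤ a ∧ a ≤ 122)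
  · have h1 : (32:Int) ≤ a ∧ a ≤ 126 := by omega
    simp [h1, h2]
  · simp [h2]

-- ===== VERDICT (by name: the statement is the Claim_ definition above) =====
theorem choose_candidate_spec : Claim_equal_choose_candidate := by
  intro candidates _
  unfold Spec_choose_candidate choose_candidate choose_candidate_alt
  by_cases hnil : candidates = []
  · simp [hnil]
  · simp only [hnil, if_false]
    rw [ccFold_eq]
    have key := filter_letter_printable candidates
    rw [key]
    simp only [Option.none_or]
    generalize hP : candidates.filter (fun c => decide (32 ≤ c ∧ c ≤ 126)) = P at key ⊢
    generalize hL : candidates.filter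
        (fun c => decide ((65 ≤ c ∧ c ≤ 90) ∨ (97 ≤ c ∧ c ≤ 122))) = L at key ⊢
    match P, key with
    | [], key =>
      have hLe : L = [] := by simpa using key.symm
      simp [hLe, PySem.List.pyGet?]
    | [x], key =>
      by_cases h2 : ((65:Int) ≤ x ∧ x ≤ 90) ∨ ((97:Int) ≤ x ∧ x ≤ 122)
      · have : L = [x] := by simp [List.filter_cons, h2] at key; exact key.symm
        simp [this, PySem.List.pyGet?_zero_cons]
      · have : L = [] := by simp [h2] at key; exact key
        simp [this, PySem.List.pyGet?_zero_cons]
    | x :: y :: t, key =>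
      match L with
      | [] =>
        simp [PySem.List.pyGet?_zero_cons]
      | a :: b =>
        simp [PySem.List.pyGet?_zero_cons]
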